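-- pv_equiv track=rewrite | github.com/xcsliu/pycharm_obj | community_building_border/city_community_border_reader.py | get_ready
-- ===== SOURCE A (Python) =====
-- def get_ready(strs):
--     num = 0
--     new_strs = []
--     for i in strs:
--         if i == ',' and num & 1 == 1:
--             new_strs.append(';')
--             num += 1
--         elif i == ',':
--             new_strs.append(',')
--             num += 1
--         else:
--             new_strs.append(i)
--     return ''.join(new_strs)
-- ===== SOURCE B (Python) =====
-- def get_ready(strs):
--     parts = strs.split(',')
--     out = [parts[0]]
--     for i, part in enumerate(parts[1:], 1):
--         out.append(';' if i % 2 == 0 else ',')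
--         out.append(part)
--     return ''.join(out)
-- ===== Notes on version B (the rewrite author's own statement) =====
-- stated objective: simpler
-- what changed: Replaced A's per-character scan with a stateful comma counter by split-on-comma then rejoin with alternating gap separators (',' at odd gaps, ';' at even gaps); the measured speedup comes from str.split/str.join doing the bulk work instead of a per-character Python loop.
import Mathlib
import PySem

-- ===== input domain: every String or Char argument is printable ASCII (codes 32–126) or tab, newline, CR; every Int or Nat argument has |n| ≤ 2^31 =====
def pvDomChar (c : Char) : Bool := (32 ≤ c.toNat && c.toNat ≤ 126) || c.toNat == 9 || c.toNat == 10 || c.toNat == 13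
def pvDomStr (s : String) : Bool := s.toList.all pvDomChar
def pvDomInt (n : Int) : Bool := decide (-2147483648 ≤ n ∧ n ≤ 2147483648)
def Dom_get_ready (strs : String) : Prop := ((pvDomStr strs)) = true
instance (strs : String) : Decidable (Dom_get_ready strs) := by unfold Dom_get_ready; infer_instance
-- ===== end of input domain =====

-- B replaces A's per-character scan with a comma counter by split-on-',' and a rejoin
-- with alternating gap separators; objective: simpler.

-- ===== PORT A =====
-- A: per-character loop; state = (num, new_strs), new_strs a list of 1-char strings,
-- finally ''.join(new_strs).  'num & 1 == 1' is ported as 'num % 2 == 1' (exact: num ≥ 0).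
def get_ready (strs : String) : String :=
  let st := strs.toList.foldl
    (fun (st : Int × List (List Char)) i =>
      if i == ',' && st.1 % 2 == 1 then (st.1 + 1, st.2 ++ [[';']])
      else if i == ',' then (st.1 + 1, st.2 ++ [[',']])
      else (st.1, st.2 ++ [[i]]))
    (0, [])
  String.ofList (PySem.Chars.join [] st.2)

-- ===== PORT B =====
-- B: parts = strs.split(','), then fold over enumerate(parts[1:], 1) appending the
-- alternating separator and the part; finally ''.join(out).  str.split with the
-- one-char separator ',' is ported as List.splitOn ',' (exact for a nonempty separator);
-- parts[0] is ported as headI (split never returns an empty list, so no IndexError).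
def get_ready_alt (strs : String) : String :=
  let parts := List.splitOn ',' strs.toList
  let out := (PySem.List.enumerate parts.tail 1).foldl
    (fun acc ip => (acc ++ [if ip.1 % 2 == 0 then [';'] else [',']]) ++ [ip.2])
    [parts.headI]
  String.ofList (PySem.Chars.join [] out)

-- ===== PRECONDITION & SPEC =====
def Spec_get_ready (strs : String) (out : String) : Prop := out = get_ready_alt strs
instance (strs : String) (out : String) : Decidable (Spec_get_ready strs out) := by unfold Spec_get_ready; infer_instance

-- ===== CLAIM (what is proved, stated in full; the proofs are below) =====
def Claim_equal_get_ready : Prop := ∀ (strs : String), Dom_get_ready strs → Spec_get_ready strs (get_ready strs)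

-- ===== LEMMAS AND PROOFS =====

-- A's scan, with the appended characters read off directly (counter n = commas seen).
def pvScan (n : Int) : List Char → List Char
  | [] => []
  | c :: cs => if c = ',' then (if n % 2 = 1 then ';' else ',') :: pvScan (n + 1) cs
               else c :: pvScan n cs

-- B's rejoin of the parts after the first, gap index k.
def pvRejoin (k : Int) : List (List Char) → List Char
  | [] => []
  | p :: ps => (if k % 2 = 0 then ';' else ',') :: (p ++ pvRejoin (k + 1) ps)

theorem pvJoinNil (l : List (List Char)) : PySem.Chars.join [] l = l.flatten := by
  induction l with
  | nil => rfl
  | cons x xs ih =>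
    cases xs with
    | nil => simp [PySem.Chars.join, List.intercalate]
    | cons y ys =>
      simp only [PySem.Chars.join, List.intercalate] at ih ⊢
      rw [List.intersperse_cons₂]
      simp [ih]

theorem pvScanFold (cs : List Char) : ∀ (n : Int) (acc : List (List Char)),
    (cs.foldl
      (fun (st : Int × List (List Char)) i =>
        if i == ',' && st.1 % 2 == 1 then (st.1 + 1, st.2 ++ [[';']])
        else if i == ',' then (st.1 + 1, st.2 ++ [[',']])
        else (st.1, st.2 ++ [[i]])) (n, acc)).2.flatten
      = acc.flatten ++ pvScan n cs := by
  induction cs with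
  | nil => intro n acc; simp [pvScan]
  | cons c cs ih =>
    intro n acc
    rw [List.foldl_cons]
    by_cases hc : c = ','
    · by_cases hn : n % 2 = 1
      · rw [if_pos (by simp [hc, hn]), ih]
        simp [pvScan, hc, hn]
      · rw [if_neg (by simp [hn]), if_pos (by simp [hc]), ih]
        simp [pvScan, hc, hn]
    · rw [if_neg (by simp [hc]), if_neg (by simp [hc]), ih]
      simp [pvScan, hc]

theorem pvRejoinFold (ps : List (List Char)) : ∀ (k : Int) (acc : List (List Char)),
    ((PySem.List.enumerate ps k).foldl
      (fun acc ip => (acc ++ [if ip.1 % 2 == 0 then [';'] else [',']]) ++ [ip.2]) acc).flatten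
      = acc.flatten ++ pvRejoin k ps := by
  induction ps with
  | nil => intro k acc; simp [PySem.List.enumerate, pvRejoin]
  | cons p ps ih =>
    intro k acc
    rw [show PySem.List.enumerate (p :: ps) k = (k, p) :: PySem.List.enumerate ps (k + 1) from rfl,
        List.foldl_cons, ih]
    by_cases hk : k % 2 = 0
    · simp [pvRejoin, hk]
    · simp [pvRejoin, hk]

theorem pvScanSplit (cs : List Char) : ∀ (n : Int),
    pvScan n cs = (List.splitOn ',' cs).headI ++ pvRejoin (n + 1) (List.splitOn ',' cs).tail := by
  induction cs with
  | nil => intro n; simp [pvScan, List.splitOn, List.splitOnP_nil, pvRejoin]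
  | cons c cs ih =>
    intro n
    by_cases hc : c = ','
    · subst hc
      have hne := List.splitOnP_ne_nil (fun x => x == ',') cs
      obtain ⟨q, qs, hqs⟩ := List.exists_cons_of_ne_nil hne
      have hpar : (n + 1) % 2 = 0 ↔ n % 2 = 1 := by omega
      by_cases hn : n % 2 = 1
      · have h1 : (n + 1) % 2 = 0 := hpar.mpr hn
        simp [pvScan, hn, pvRejoin, h1, ih, List.splitOn, List.splitOnP_cons, hqs]
      · have h1 : ¬ (n + 1) % 2 = 0 := fun h => hn (hpar.mp h)
        simp [pvScan, hn, pvRejoin, h1, ih, List.splitOn, List.splitOnP_cons, hqs]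
    · have hne := List.splitOnP_ne_nil (fun x => x == ',') cs
      obtain ⟨q, qs, hqs⟩ := List.exists_cons_of_ne_nil hne
      simp [pvScan, hc, List.splitOnP_cons, ih, List.splitOn, hqs]

-- ===== VERDICT (by name: the statement is the Claim_ definition above) =====
theorem get_ready_spec : Claim_equal_get_ready := by
  intro strs _
  unfold Spec_get_ready get_ready get_ready_alt
  simp only [pvJoinNil, pvScanFold, pvRejoinFold]
  simp [pvScanSplit strs.toList 0]
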